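-- pv_equiv track=rewrite | github.com/BujorelActimel/advent_of_code_2023 | day7/cards_part2.py | get_relative_hand_power
-- ===== SOURCE A (Python) =====
-- def get_hand_power(hand):
--     if five_of_a_kind(hand):
--         return 6
--     if four_of_a_kind(hand):
--         return 5
--     if full_house(hand):
--         return 4
--     if three_of_a_kind(hand):
--         return 3
--     if two_pair(hand):
--         return 2
--     if one_pair(hand):
--         return 1
--     return 0
--
-- def get_relative_hand_power(hand):
--     if "J" not in hand:
--         return get_hand_power(hand)
--
--     max_power = get_hand_power(hand)
--     cards = ["A", "K", "Q", "T", "9", "8", "7", "6", "5", "4", "3", "2"]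
--     for card in cards:
--         max_power = max(max_power, get_hand_power(hand.replace("J", card)))
--
--     return max_power
--
-- def one_pair(hand):
--     sorted_hand = sorted(hand)
--     for card in sorted_hand:
--         if sorted_hand.count(card) == 2:
--             return True
--     return False
--
-- def two_pair(hand):
--     sorted_hand = sorted(hand)
--     pairs = 0
--     for card in sorted_hand:
--         if sorted_hand.count(card) == 2:
--             pairs += 1
--     return pairs == 2 * 2
--
-- def three_of_a_kind(hand):
--     sorted_hand = sorted(hand)
--     for card in sorted_hand:
--         if sorted_hand.count(card) == 3:
--             return True
--     return False
--
-- def full_house(hand):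
--     return one_pair(hand) and three_of_a_kind(hand)
--
-- def four_of_a_kind(hand):
--     sorted_hand = sorted(hand)
--     for card in sorted_hand:
--         if sorted_hand.count(card) == 4:
--             return True
--     return False
--
-- def five_of_a_kind(hand):
--     return len(set(hand)) == 1
-- ===== SOURCE B (Python) =====
-- RANKS = "AKQT98765432"
--
--
-- def _power(vals):
--     # hand power from the multiset of card multiplicities
--     if len(vals) == 1:
--         return 6
--     freq = {}
--     for v in vals:
--         freq[v] = freq.get(v, 0) + 1
--     if freq.get(4, 0) > 0:
--         return 5
--     if freq.get(2, 0) > 0 and freq.get(3, 0) > 0: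
--         return 4
--     if freq.get(3, 0) > 0:
--         return 3
--     if freq.get(2, 0) == 2:
--         return 2
--     if freq.get(2, 0) > 0:
--         return 1
--     return 0
--
--
-- def get_relative_hand_power(hand):
--     counts = {}
--     for ch in hand:
--         counts[ch] = counts.get(ch, 0) + 1
--     jokers = counts.pop("J", 0)
--     vals = list(counts.values())
--     if jokers == 0:
--         return _power(vals)
--     # Merging the jokers into a rank absent from the hand yields the same
--     # multiset as leaving them as their own group, so one candidate covers
--     # both that case and the un-replaced hand; the only other candidates are
--     # the distinct multiplicities of ranks actually present, each bumped.
--     best = _power(vals + [jokers])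
--     for v in sorted({v for c, v in counts.items() if c in RANKS}):
--         cand = list(vals)
--         cand.remove(v)
--         cand.append(v + jokers)
--         best = max(best, _power(cand))
--     return best
-- ===== Notes on version B (the rewrite author's own statement) =====
-- stated objective: faster
-- what changed: Eliminates A's 12-way replace-then-rescore loop entirely: one counting pass separates the joker count, and the answer is the max of the power of the multiplicity multiset with the jokers as their own group (which also covers merging them into any absent rank) and of that multiset with each DISTINCT present-rank multiplicity bumped by the joker count, powers read off a count-of-counts table instead of sorting and rescanning.
import Mathlib
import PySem

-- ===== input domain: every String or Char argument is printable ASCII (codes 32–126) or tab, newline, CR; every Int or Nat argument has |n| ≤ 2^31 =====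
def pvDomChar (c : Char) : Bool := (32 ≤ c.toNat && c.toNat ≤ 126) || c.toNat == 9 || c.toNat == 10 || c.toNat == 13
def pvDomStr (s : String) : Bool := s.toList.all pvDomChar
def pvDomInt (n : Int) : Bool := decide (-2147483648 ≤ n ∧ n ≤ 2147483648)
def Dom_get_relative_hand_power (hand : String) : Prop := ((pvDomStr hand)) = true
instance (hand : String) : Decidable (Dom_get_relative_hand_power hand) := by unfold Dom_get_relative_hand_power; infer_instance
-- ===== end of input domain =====

-- B drops A's 12-way replace-then-rescore loop: one counting pass separates the jokers,
-- and the answer is the max over the few candidate multiplicity multisets — jokers as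
-- their own group (covers the un-replaced hand and any absent rank) and each distinct
-- present-rank multiplicity bumped by the joker count (objective: faster).

-- ===== PORT A =====
def pv_one_pair (hand : String) : Bool :=
  let sorted_hand := PySem.List.sorted hand.toList (fun c => c) false
  sorted_hand.any (fun card => PySem.List.count sorted_hand card == 2)

def pv_two_pair (hand : String) : Bool :=
  let sorted_hand := PySem.List.sorted hand.toList (fun c => c) false
  let pairs : Int :=
    sorted_hand.foldl (fun pairs card =>
      if PySem.List.count sorted_hand card == 2 then pairs + 1 else pairs) 0
  pairs == 2 * 2

def pv_three_of_a_kind (hand : String) : Bool :=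
  let sorted_hand := PySem.List.sorted hand.toList (fun c => c) false
  sorted_hand.any (fun card => PySem.List.count sorted_hand card == 3)

def pv_full_house (hand : String) : Bool :=
  pv_one_pair hand && pv_three_of_a_kind hand

def pv_four_of_a_kind (hand : String) : Bool :=
  let sorted_hand := PySem.List.sorted hand.toList (fun c => c) false
  sorted_hand.any (fun card => PySem.List.count sorted_hand card == 4)

def pv_five_of_a_kind (hand : String) : Bool :=
  PySem.Set.len (PySem.Set.ofList hand.toList) == 1

def pv_get_hand_power (hand : String) : Int :=
  if pv_five_of_a_kind hand then 6
  else if pv_four_of_a_kind hand then 5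
  else if pv_full_house hand then 4
  else if pv_three_of_a_kind hand then 3
  else if pv_two_pair hand then 2
  else if pv_one_pair hand then 1
  else 0

def get_relative_hand_power (hand : String) : Int :=
  if !PySem.Str.isIn "J" hand then pv_get_hand_power hand
  else
    let cards : List String := ["A", "K", "Q", "T", "9", "8", "7", "6", "5", "4", "3", "2"]
    cards.foldl
      (fun max_power card => max max_power (pv_get_hand_power (PySem.Str.replace hand "J" card)))
      (pv_get_hand_power hand)

-- ===== PORT B =====
-- _power(vals): hand power read off the multiset of multiplicities via a count-of-counts dict
def pv_power_alt (vals : List Int) : Int :=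
  if vals.length == 1 then 6
  else
    let freq := vals.foldl (fun d v => d.insert v (d.getD v 0 + 1)) (PySem.Dict.empty : PySem.Dict Int Int)
    if 0 < freq.getD 4 0 then 5
    else if 0 < freq.getD 2 0 ∧ 0 < freq.getD 3 0 then 4
    else if 0 < freq.getD 3 0 then 3
    else if freq.getD 2 0 == 2 then 2
    else if 0 < freq.getD 2 0 then 1
    else 0

def get_relative_hand_power_alt (hand : String) : Int :=
  let counts := hand.toList.foldl (fun d ch => d.insert ch (d.getD ch 0 + 1)) PySem.Dict.empty
  let jokers := counts.getD 'J' 0            -- counts.pop("J", 0)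
  let counts := counts.erase 'J'
  let vals := counts.values
  if jokers == 0 then pv_power_alt vals
  else
    -- candidates: jokers as their own group (= un-replaced hand = merge into an
    -- absent rank), and each distinct present-rank multiplicity bumped by jokers
    (PySem.List.sorted
        (PySem.Set.ofList
          ((counts.items.filter (fun p => ("AKQT98765432".toList).contains p.1)).map (fun p => p.2)))
        (fun v => v) false).foldl
      (fun best v =>
        -- cand.remove(v): remove? is some here, v is a value of a present rank
        max best (pv_power_alt (((PySem.List.remove? vals v).getD []) ++ [v + jokers])))
      (pv_power_alt (vals ++ [jokers]))

-- ===== PRECONDITION & SPEC =====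
def Spec_get_relative_hand_power (hand : String) (out : Int) : Prop := out = get_relative_hand_power_alt hand
instance (hand : String) (out : Int) : Decidable (Spec_get_relative_hand_power hand out) := by unfold Spec_get_relative_hand_power; infer_instance

-- ===== CLAIM (what is proved, stated in full; the proofs are below) =====
def Claim_equal_get_relative_hand_power : Prop := ∀ (hand : String), Dom_get_relative_hand_power hand → Spec_get_relative_hand_power hand (get_relative_hand_power hand)

-- ===== LEMMAS AND PROOFS =====

-- power of a list of multiplicities (the common mathematical core of both scorers)
def pvValsPower (vals : List Int) : Int :=
  if vals.length == 1 then 6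
  else if vals.contains 4 then 5
  else if vals.contains 2 && vals.contains 3 then 4
  else if vals.contains 3 then 3
  else if PySem.List.count vals 2 == 2 then 2
  else if vals.contains 2 then 1
  else 0

theorem pvValsPower_perm {vs ws : List Int} (h : vs.Perm ws) : pvValsPower vs = pvValsPower ws := by
  simp only [pvValsPower, PySem.List.count_eq, h.length_eq, h.count_eq,
    List.Perm.contains_eq h]
  rfl

theorem power_alt_eq (vals : List Int) : pv_power_alt vals = pvValsPower vals := by
  unfold pv_power_alt pvValsPower
  rw [show (vals.foldl (fun d v => d.insert v (d.getD v 0 + 1)) PySem.Dict.empty)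
      = PySem.Dict.counter vals from rfl]
  simp only [PySem.Dict.getD_counter, PySem.List.count_eq]
  have h2 : (0 < (List.count 2 vals : Int)) ↔ vals.contains 2 = true := by
    simp [List.count_pos_iff]
  have h3 : (0 < (List.count 3 vals : Int)) ↔ vals.contains 3 = true := by
    simp [List.count_pos_iff]
  have h4 : (0 < (List.count 4 vals : Int)) ↔ vals.contains 4 = true := by
    simp [List.count_pos_iff]
  by_cases hl : vals.length == 1
  · simp [hl]
  · simp only [hl]
    split_ifs with a b c d e f g h i j k l m n o p q r s <;>
      simp_all <;> omega

def pvVals (l : List Char) : List Int :=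
  (PySem.List.dedup l).map (fun k => (List.count k l : Int))

theorem hasCount (l : List Char) (k : Nat) :
    ((PySem.List.sorted l (fun c => c) false).any
      (fun c => PySem.List.count (PySem.List.sorted l (fun c => c) false) c == k))
    = (pvVals l).contains ((k : Int)) := by
  have hp := PySem.List.sorted_perm l (fun c => c) false
  rw [Bool.eq_iff_iff]
  simp only [List.any_eq_true, PySem.List.count_eq, hp.count_eq, hp.mem_iff,
    List.contains_iff_mem, pvVals, List.mem_map, PySem.List.mem_dedup, beq_iff_eq]
  constructor
  · rintro ⟨x, hx, hc⟩; exact ⟨x, hx, by exact_mod_cast hc⟩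
  · rintro ⟨x, hx, hc⟩; exact ⟨x, hx, by exact_mod_cast hc⟩

theorem dedup_perm (l : List Char) : (PySem.List.dedup l).Perm l.dedup := by
  rw [List.perm_ext_iff_of_nodup (PySem.List.nodup_dedup l) (List.nodup_dedup l)]
  intro a; simp [List.mem_dedup]

theorem countP_eq_two_mul (l : List Char) :
    List.countP (fun c => List.count c l == 2) l
      = 2 * List.countP (fun c => List.count c l == 2) (PySem.List.dedup l) := by
  have h := List.sum_map_count_dedup_filter_eq_countP (fun c => List.count c l == 2) l
  rw [← h]
  have hmap : (l.dedup.filter (fun c => List.count c l == 2)).map (fun x => List.count x l)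
      = (l.dedup.filter (fun c => List.count c l == 2)).map (fun _ => 2) := by
    apply List.map_congr_left
    intro x hx
    have := List.of_mem_filter hx
    simpa using this
  rw [hmap, List.map_const', List.sum_replicate, smul_eq_mul]
  rw [(dedup_perm l).countP_eq, List.countP_eq_length_filter]
  omega

theorem five_eq (s : String) :
    pv_five_of_a_kind s = ((pvVals s.toList).length == 1) := by
  rw [Bool.eq_iff_iff]
  simp [pv_five_of_a_kind, PySem.Set.len, pvVals]

theorem pair_eq (s : String) : pv_one_pair s = (pvVals s.toList).contains 2 := by
  simpa using hasCount s.toList 2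

theorem three_eq (s : String) : pv_three_of_a_kind s = (pvVals s.toList).contains 3 := by
  simpa using hasCount s.toList 3

theorem four_eq (s : String) : pv_four_of_a_kind s = (pvVals s.toList).contains 4 := by
  simpa using hasCount s.toList 4

theorem twopair_eq (s : String) :
    pv_two_pair s = (PySem.List.count (pvVals s.toList) 2 == 2) := by
  simp only [pv_two_pair]
  have hp := PySem.List.sorted_perm s.toList (fun c => c) false
  rw [PySem.List.foldl_if_add_one]
  simp only [PySem.List.count_eq, hp.count_eq]
  rw [hp.countP_eq, Bool.eq_iff_iff]
  simp only [beq_iff_eq, pvVals, List.count_eq_countP, List.countP_map]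
  have hq : List.countP ((fun x => x == (2:Int)) ∘ fun k => ((List.countP (fun x => x == k) s.toList : Nat) : Int))
      (PySem.List.dedup s.toList)
      = List.countP (fun c => List.countP (fun x => x == c) s.toList == 2) (PySem.List.dedup s.toList) := by
    apply List.countP_congr
    intro k _
    simp [Function.comp]
    omega
  rw [hq]
  have h2 := countP_eq_two_mul s.toList
  simp only [List.count_eq_countP] at h2
  omega

theorem get_hand_power_eq (s : String) : pv_get_hand_power s = pvValsPower (pvVals s.toList) := by
  unfold pv_get_hand_power pvValsPower pv_full_house
  rw [five_eq, four_eq, pair_eq, three_eq, twopair_eq]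

theorem go_single (a b : Char) (fuel : Nat) : ∀ (l acc : List Char), l.length ≤ fuel →
    PySem.Chars.replace.go [a] [b] fuel l acc
      = acc.reverse ++ l.map (fun x => if x = a then b else x) := by
  induction fuel with
  | zero =>
    intro l acc h
    have : l = [] := List.eq_nil_of_length_eq_zero (Nat.le_zero.mp h)
    subst this
    simp [PySem.Chars.replace.go]
  | succ n ih =>
    intro l acc h
    cases l with
    | nil => simp [PySem.Chars.replace.go]
    | cons hd t =>
      show (if [a].isPrefixOf (hd :: t) then
              PySem.Chars.replace.go [a] [b] n (List.drop [a].length (hd :: t)) ([b].reverse ++ acc)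
            else PySem.Chars.replace.go [a] [b] n t (hd :: acc)) = _
      by_cases hd_eq : hd = a
      · subst hd_eq
        rw [if_pos (by simp [List.isPrefixOf])]
        rw [ih _ _ (by simpa using Nat.le_of_succ_le_succ (by simpa using h))]
        simp
      · rw [if_neg (by simp [List.isPrefixOf, Ne.symm hd_eq])]
        rw [ih _ _ (by simpa using Nat.le_of_succ_le_succ (by simpa using h))]
        simp [hd_eq]

theorem replace_single (a b : Char) (l : List Char) :
    PySem.Chars.replace l [a] [b] = l.map (fun x => if x = a then b else x) := by
  rw [PySem.Chars.replace]
  rw [if_neg (by simp)]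
  rw [go_single a b l.length l [] le_rfl]
  simp

theorem countP_or_single (c j : Char) (hne : c ≠ j) (l : List Char) :
    List.countP (fun x => x == c || x == j) l = List.count c l + List.count j l := by
  induction l with
  | nil => simp
  | cons hd t ih =>
    by_cases h1 : hd = c
    · subst h1; simp [ih, hne]; omega
    · by_cases h2 : hd = j
      · subst h2; simp [ih, h1]; omega
      · simp [ih, h1, h2]

def pvF (c : Char) : Char → Char := fun x => if x = 'J' then c else x
def pvNdl (l : List Char) : List Char := (PySem.List.dedup l).filter (fun x => !(x == 'J'))
def pvNvals (l : List Char) : List Int := (pvNdl l).map (fun k => (List.count k l : Int))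

theorem count_map_f_of_ne (c : Char) (l : List Char) (k : Char) (hkc : k ≠ c) (hkJ : k ≠ 'J') :
    List.count k (l.map (pvF c)) = List.count k l := by
  rw [List.count_eq_countP, List.countP_map, List.count_eq_countP]
  apply List.countP_congr
  intro x _
  simp only [Function.comp, pvF, beq_iff_eq]
  by_cases hx : x = 'J'
  · simp [hx, Ne.symm hkc, Ne.symm hkJ]
  · simp [hx]

theorem count_map_f_self (c : Char) (hc : c ≠ 'J') (l : List Char) :
    List.count c (l.map (pvF c)) = List.count c l + List.count 'J' l := by
  rw [List.count_eq_countP, List.countP_map, ← countP_or_single c 'J' hc l]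
  apply List.countP_congr
  intro x _
  simp only [Function.comp, pvF, beq_iff_eq]
  by_cases hx : x = 'J'
  · simp [hx]
  · simp [hx]

theorem mem_map_f (l : List Char) (c : Char) (hc : c ≠ 'J') (hJ : 'J' ∈ l) (x : Char) :
    x ∈ l.map (pvF c) ↔ ((x ∈ l ∧ x ≠ 'J') ∨ x = c) := by
  simp only [List.mem_map, pvF]
  constructor
  · rintro ⟨y, hy, hfy⟩
    by_cases hyJ : y = 'J'
    · subst hyJ; simp at hfy; right; exact hfy.symm
    · rw [if_neg hyJ] at hfy; subst hfy; exact Or.inl ⟨hy, hyJ⟩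
  · rintro (⟨hx, hxJ⟩ | rfl)
    · exact ⟨x, hx, by rw [if_neg hxJ]⟩
    · exact ⟨'J', hJ, by simp⟩

theorem nodup_pvNdl (l : List Char) : (pvNdl l).Nodup :=
  List.Nodup.filter _ (PySem.List.nodup_dedup l)

theorem mem_pvNdl (l : List Char) (x : Char) : x ∈ pvNdl l ↔ (x ∈ l ∧ x ≠ 'J') := by
  simp [pvNdl]

-- a map over nodup keys with one key's value replaced, as erase-and-append on the value list
theorem map_update_perm (keys : List Char) (hnd : keys.Nodup) (c : Char) (hc : c ∈ keys)
    (f : Char → Int) (w : Int) :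
    (keys.map (fun k => if k = c then w else f k)).Perm ((keys.map f).erase (f c) ++ [w]) := by
  have hp : keys.Perm (c :: keys.erase c) := List.perm_cons_erase hc
  have herase_ne : ∀ k ∈ keys.erase c, k ≠ c := by
    intro k hk
    exact (List.Nodup.mem_erase_iff hnd).mp hk |>.1
  have h1 : ((keys.erase c).map (fun k => if k = c then w else f k)) = (keys.erase c).map f := by
    apply List.map_congr_left
    intro k hk
    rw [if_neg (herase_ne k hk)]
  have hA : (keys.map (fun k => if k = c then w else f k)).Perm
      (w :: (keys.erase c).map f) := by
    have := hp.map (fun k => if k = c then w else f k)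
    simpa [h1] using this
  have hB : (w :: (keys.erase c).map f).Perm (((keys.erase c).map f) ++ [w]) :=
    (List.perm_append_singleton w ((keys.erase c).map f)).symm
  have hC : (((keys.erase c).map f) ++ [w]).Perm (((keys.map f).erase (f c)) ++ [w]) := by
    apply List.Perm.append_right
    have h4 : (keys.map f).Perm (f c :: (keys.erase c).map f) := by
      simpa using hp.map f
    have h5 := h4.erase (f c)
    simp only [List.erase_cons_head] at h5
    exact h5.symm
  exact (hA.trans hB).trans hC

-- multiset of multiplicities of the hand with J replaced by a PRESENT rank c
theorem vals_map_present (l : List Char) (c : Char) (hc : c ≠ 'J') (hJ : 'J' ∈ l) (hcl : c ∈ l) :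
    (pvVals (l.map (pvF c))).Perm
      ((pvNvals l).erase ((List.count c l : Int)) ++ [(List.count c l : Int) + (List.count 'J' l : Int)]) := by
  have hndm : (PySem.List.dedup (l.map (pvF c))).Nodup := PySem.List.nodup_dedup _
  have hkeys : (PySem.List.dedup (l.map (pvF c))).Perm (pvNdl l) := by
    rw [List.perm_ext_iff_of_nodup hndm (nodup_pvNdl l)]
    intro x
    rw [PySem.List.mem_dedup, mem_map_f l c hc hJ x, mem_pvNdl]
    constructor
    · rintro (h | rfl)
      · exact h
      · exact ⟨hcl, hc⟩
    · exact Or.inl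
  have h1 : (pvVals (l.map (pvF c))).Perm
      ((pvNdl l).map (fun k => (List.count k (l.map (pvF c)) : Int))) := by
    unfold pvVals
    exact hkeys.map _
  have h2 : ((pvNdl l).map (fun k => (List.count k (l.map (pvF c)) : Int)))
      = (pvNdl l).map (fun k => if k = c then (List.count c l : Int) + (List.count 'J' l : Int)
          else (List.count k l : Int)) := by
    apply List.map_congr_left
    intro k hk
    obtain ⟨hkl, hkJ⟩ := (mem_pvNdl l k).mp hk
    by_cases hkc : k = c
    · subst hkc
      rw [if_pos rfl, count_map_f_self k hc l]
      push_cast; ring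
    · rw [if_neg hkc, count_map_f_of_ne c l k hkc hkJ]
  have hcnd : c ∈ pvNdl l := (mem_pvNdl l c).mpr ⟨hcl, hc⟩
  have h3 := map_update_perm (pvNdl l) (nodup_pvNdl l) c hcnd
    (fun k => (List.count k l : Int)) ((List.count c l : Int) + (List.count 'J' l : Int))
  exact (h2 ▸ h1).trans h3

-- multiset of multiplicities of the hand with J replaced by an ABSENT rank c
theorem vals_map_absent (l : List Char) (c : Char) (hc : c ≠ 'J') (hJ : 'J' ∈ l) (hcl : c ∉ l) :
    (pvVals (l.map (pvF c))).Perm ((pvNvals l) ++ [(List.count 'J' l : Int)]) := by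
  have hndm : (PySem.List.dedup (l.map (pvF c))).Nodup := PySem.List.nodup_dedup _
  have hcnd : c ∉ pvNdl l := fun h => hcl ((mem_pvNdl l c).mp h).1
  have hnd2 : (pvNdl l ++ [c]).Nodup := by
    rw [List.nodup_append]
    refine ⟨nodup_pvNdl l, List.nodup_singleton c, ?_⟩
    intro a ha b hb
    have hbc : b = c := by simpa using hb
    intro heq
    exact hcnd (hbc ▸ heq ▸ ha)
  have hkeys : (PySem.List.dedup (l.map (pvF c))).Perm (pvNdl l ++ [c]) := by
    rw [List.perm_ext_iff_of_nodup hndm hnd2]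
    intro x
    rw [PySem.List.mem_dedup, mem_map_f l c hc hJ x, List.mem_append, mem_pvNdl]
    simp
  have h1 : (pvVals (l.map (pvF c))).Perm
      ((pvNdl l ++ [c]).map (fun k => (List.count k (l.map (pvF c)) : Int))) := by
    unfold pvVals
    exact hkeys.map _
  have h2 : ((pvNdl l ++ [c]).map (fun k => (List.count k (l.map (pvF c)) : Int)))
      = pvNvals l ++ [(List.count 'J' l : Int)] := by
    rw [List.map_append]
    congr 1
    · apply List.map_congr_left
      intro k hk
      obtain ⟨hkl, hkJ⟩ := (mem_pvNdl l k).mp hk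
      have hkc : k ≠ c := fun h => hcl (h ▸ hkl)
      rw [count_map_f_of_ne c l k hkc hkJ]
    · have h0 : List.count c l = 0 := List.count_eq_zero.mpr hcl
      simp [count_map_f_self c hc l, h0]
  exact h2 ▸ h1

-- the un-replaced hand's multiplicity multiset, J separated out
theorem vals_base_perm (l : List Char) (hJ : 'J' ∈ l) :
    (pvVals l).Perm ((pvNvals l) ++ [(List.count 'J' l : Int)]) := by
  have hnd2 : (pvNdl l ++ ['J']).Nodup := by
    simp [List.nodup_append, nodup_pvNdl l, mem_pvNdl]
  have hkeys : (PySem.List.dedup l).Perm (pvNdl l ++ ['J']) := by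
    rw [List.perm_ext_iff_of_nodup (PySem.List.nodup_dedup l) hnd2]
    intro x
    rw [PySem.List.mem_dedup, List.mem_append, mem_pvNdl]
    by_cases hx : x = 'J' <;> simp [hx, hJ]
  have h1 : (pvVals l).Perm ((pvNdl l ++ ['J']).map (fun k => (List.count k l : Int))) :=
    hkeys.map _
  simpa [pvNvals] using h1

-- when there is no J, the B-side value list is exactly pvVals
theorem pvNdl_no_J (l : List Char) (hJ : 'J' ∉ l) : pvNdl l = PySem.List.dedup l := by
  apply List.filter_eq_self.mpr
  intro x hx
  have : x ∈ l := (PySem.List.mem_dedup l x).mp hx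
  simp
  exact fun h => hJ (h ▸ this)

-- the B port's vals list: values of counter(hand) with 'J' erased
theorem erase_values (l : List Char) :
    ((PySem.Dict.counter l).erase 'J').values = pvNvals l := by
  have hitems : ((PySem.Dict.counter l).erase 'J').items
      = (pvNdl l).map (fun k => (k, (List.count k l : Int))) := by
    show ((PySem.Dict.counter l).items.filter (fun p => !(p.1 == 'J'))) = _
    rw [PySem.Dict.items_counter, List.filter_map]
    rfl
  show (((PySem.Dict.counter l).erase 'J').items).map (·.2) = _
  rw [hitems, List.map_map]
  rfl

-- the filtered-items value list B builds its candidate set from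
theorem filter_items_vals (l : List Char) :
    (((((PySem.Dict.counter l).erase 'J').items).filter
        (fun p => ("AKQT98765432".toList).contains p.1)).map (fun p => p.2))
      = ((pvNdl l).filter (fun k => ("AKQT98765432".toList).contains k)).map
          (fun k => (List.count k l : Int)) := by
  have hitems : ((PySem.Dict.counter l).erase 'J').items
      = (pvNdl l).map (fun k => (k, (List.count k l : Int))) := by
    show ((PySem.Dict.counter l).items.filter (fun p => !(p.1 == 'J'))) = _
    rw [PySem.Dict.items_counter, List.filter_map]
    rfl
  rw [hitems, List.filter_map, List.map_map]
  rfl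

-- fold of running max is bounded by any common upper bound
theorem foldl_max_le_int {α : Type} (l : List α) (f : α → Int) (m : Int)
    (h : ∀ x ∈ l, f x ≤ m) :
    ∀ init, init ≤ m → l.foldl (fun acc x => max acc (f x)) init ≤ m := by
  induction l with
  | nil => exact fun init h0 => h0
  | cons hd t ih =>
    intro init h0
    simp only [List.foldl_cons]
    exact ih (fun x hx => h x (List.mem_cons_of_mem hd hx)) _ (max_le h0 (h hd List.mem_cons_self))

-- the replaced hand's character list
theorem replace_toList (hand : String) (c : Char) (cs : String) (hcs : cs.toList = [c]) :
    (PySem.Str.replace hand "J" cs).toList = hand.toList.map (pvF c) := by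
  rw [PySem.Str.replace, String.toList_ofList,
    show ("J" : String).toList = ['J'] from rfl, hcs, replace_single]
  rfl

-- power of one of A's replaced hands, in terms of the B-side candidate multisets
theorem percard (hand : String) (c : Char) (cs : String) (hcs : cs.toList = [c])
    (hc : c ≠ 'J') (hJ : 'J' ∈ hand.toList) :
    pv_get_hand_power (PySem.Str.replace hand "J" cs)
      = if c ∈ hand.toList then
          pvValsPower ((pvNvals hand.toList).erase ((List.count c hand.toList : Int))
            ++ [(List.count c hand.toList : Int) + (List.count 'J' hand.toList : Int)])
        else
          pvValsPower ((pvNvals hand.toList) ++ [(List.count 'J' hand.toList : Int)]) := by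
  rw [get_hand_power_eq, replace_toList hand c cs hcs]
  by_cases hcl : c ∈ hand.toList
  · rw [if_pos hcl]
    exact pvValsPower_perm (vals_map_present hand.toList c hc hJ hcl)
  · rw [if_neg hcl]
    exact pvValsPower_perm (vals_map_absent hand.toList c hc hJ hcl)

theorem get_relative_hand_power_spec' : ∀ (hand : String),
    get_relative_hand_power hand = get_relative_hand_power_alt hand := by
  intro hand
  simp only [get_relative_hand_power, get_relative_hand_power_alt]
  rw [show (hand.toList.foldl (fun d ch => d.insert ch (d.getD ch 0 + 1)) PySem.Dict.empty)
      = PySem.Dict.counter hand.toList from rfl]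
  rw [PySem.Dict.getD_counter, erase_values]
  have hin : PySem.Str.isIn "J" hand = true ↔ 'J' ∈ hand.toList := by
    rw [PySem.Str.isIn_iff_infix, show ("J" : String).toList = ['J'] from rfl]
    simp [List.singleton_infix_iff]
  by_cases hJ : 'J' ∈ hand.toList
  case neg =>
    have hA : PySem.Str.isIn "J" hand = false := by
      rw [Bool.eq_false_iff]; intro h; exact hJ (hin.mp h)
    have hB : ((List.count 'J' hand.toList : Int) == 0) = true := by
      simp [List.count_eq_zero.mpr hJ]
    rw [hA, hB]
    simp only [Bool.not_false, if_true]
    rw [power_alt_eq, get_hand_power_eq]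
    have : pvNvals hand.toList = pvVals hand.toList := by
      unfold pvNvals pvVals
      rw [pvNdl_no_J hand.toList hJ]
    rw [this]
  case pos =>
    have hA : PySem.Str.isIn "J" hand = true := hin.mpr hJ
    have hB : ((List.count 'J' hand.toList : Int) == 0) = false := by
      have : List.count 'J' hand.toList ≠ 0 := by
        rw [Ne, List.count_eq_zero]; exact fun h => h hJ
      simp
      omega
    rw [hA, hB]
    simp only [Bool.not_true, Bool.false_eq_true, if_false]
    rw [filter_items_vals]
    set l := hand.toList with hl
    set nv := pvNvals l with hnv
    set j : Int := (List.count 'J' l : Int) with hj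
    set V := PySem.List.sorted
        (PySem.Set.ofList
          (List.map (fun k => (List.count k l : Int))
            (List.filter (fun k => "AKQT98765432".toList.contains k) (pvNdl l))))
        (fun v => v) false with hVdef
    have hVmem : ∀ v : Int, v ∈ V ↔
        ∃ c, c ∈ pvNdl l ∧ ("AKQT98765432".toList).contains c = true
          ∧ (List.count c l : Int) = v := by
      intro v
      rw [hVdef]
      rw [PySem.List.mem_sorted, PySem.Set.mem_ofList]
      simp only [List.mem_map, List.mem_filter]
      constructor
      · rintro ⟨c, ⟨hc1, hc2⟩, hc3⟩; exact ⟨c, hc1, hc2, hc3⟩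
      · rintro ⟨c, hc1, hc2, hc3⟩; exact ⟨c, ⟨hc1, hc2⟩, hc3⟩
    have hb0A : pv_get_hand_power hand = pvValsPower (nv ++ [j]) := by
      rw [get_hand_power_eq]
      exact pvValsPower_perm (vals_base_perm l hJ)
    have hb0B : pv_power_alt (nv ++ [j]) = pvValsPower (nv ++ [j]) := power_alt_eq _
    have hfeq : ∀ v ∈ V,
        pv_power_alt ((PySem.List.remove? nv v).getD [] ++ [v + j])
          = pvValsPower (nv.erase v ++ [v + j]) := by
      intro v hv
      obtain ⟨c, hc, _, hcv⟩ := (hVmem v).mp hv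
      have hvnv : v ∈ nv := by
        rw [hnv]; unfold pvNvals
        exact hcv ▸ List.mem_map_of_mem hc
      rw [PySem.List.remove?_eq_some_erase nv v hvnv]
      simp [power_alt_eq]
    have hcard : ∀ (c : Char) (cs : String), cs.toList = [c] → c ≠ 'J' →
        ("AKQT98765432".toList).contains c = true →
        pv_get_hand_power (PySem.Str.replace hand "J" cs)
          ≤ V.foldl (fun best v =>
              max best (pv_power_alt ((PySem.List.remove? nv v).getD [] ++ [v + j])))
              (pv_power_alt (nv ++ [j])) := by
      intro c cs hcs hc hrank
      rw [percard hand c cs hcs hc hJ]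
      by_cases hcl : c ∈ l
      · rw [if_pos hcl]
        have hv : (List.count c l : Int) ∈ V :=
          (hVmem _).mpr ⟨c, (mem_pvNdl _ c).mpr ⟨hcl, hc⟩, hrank, rfl⟩
        have hle := (PySem.List.le_foldl_max_int V
          (fun v => pv_power_alt ((PySem.List.remove? nv v).getD [] ++ [v + j]))
          (pv_power_alt (nv ++ [j]))).2 _ hv
        rw [hfeq _ hv] at hle
        exact hle
      · rw [if_neg hcl]
        have hle := (PySem.List.le_foldl_max_int V
          (fun v => pv_power_alt ((PySem.List.remove? nv v).getD [] ++ [v + j]))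
          (pv_power_alt (nv ++ [j]))).1
        exact le_of_eq_of_le hb0B.symm hle
    apply le_antisymm
    · refine foldl_max_le_int
        (["A", "K", "Q", "T", "9", "8", "7", "6", "5", "4", "3", "2"] : List String)
        (fun card => pv_get_hand_power (PySem.Str.replace hand "J" card)) _ ?h _ ?init
      case init =>
        rw [hb0A, ← hb0B]
        exact (PySem.List.le_foldl_max_int V
          (fun v => pv_power_alt ((PySem.List.remove? nv v).getD [] ++ [v + j]))
          (pv_power_alt (nv ++ [j]))).1
      case h =>
        intro cs hcs
        simp only [List.mem_cons, List.not_mem_nil, or_false] at hcs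
        rcases hcs with rfl|rfl|rfl|rfl|rfl|rfl|rfl|rfl|rfl|rfl|rfl|rfl
        · exact hcard 'A' "A" rfl (by decide) (by decide)
        · exact hcard 'K' "K" rfl (by decide) (by decide)
        · exact hcard 'Q' "Q" rfl (by decide) (by decide)
        · exact hcard 'T' "T" rfl (by decide) (by decide)
        · exact hcard '9' "9" rfl (by decide) (by decide)
        · exact hcard '8' "8" rfl (by decide) (by decide)
        · exact hcard '7' "7" rfl (by decide) (by decide)
        · exact hcard '6' "6" rfl (by decide) (by decide)
        · exact hcard '5' "5" rfl (by decide) (by decide)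
        · exact hcard '4' "4" rfl (by decide) (by decide)
        · exact hcard '3' "3" rfl (by decide) (by decide)
        · exact hcard '2' "2" rfl (by decide) (by decide)
    · refine foldl_max_le_int V
        (fun v => pv_power_alt ((PySem.List.remove? nv v).getD [] ++ [v + j])) _ ?h2 _ ?init2
      case init2 =>
        rw [hb0B, ← hb0A]
        exact (PySem.List.le_foldl_max_int
          ["A", "K", "Q", "T", "9", "8", "7", "6", "5", "4", "3", "2"]
          (fun card => pv_get_hand_power (PySem.Str.replace hand "J" card))
          (pv_get_hand_power hand)).1
      case h2 =>
        intro v hv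
        obtain ⟨c, hcnd, hrank, hcv⟩ := (hVmem v).mp hv
        obtain ⟨hcl, hcJ⟩ := (mem_pvNdl _ c).mp hcnd
        have hccases : c = 'A' ∨ c = 'K' ∨ c = 'Q' ∨ c = 'T' ∨ c = '9' ∨ c = '8'
            ∨ c = '7' ∨ c = '6' ∨ c = '5' ∨ c = '4' ∨ c = '3' ∨ c = '2' := by
          have : c ∈ "AKQT98765432".toList := by
            rw [← List.contains_iff_mem]; exact hrank
          simpa using this
        have hcsl : (String.ofList [c]).toList = [c] := by simp
        have hcs_mem : (String.ofList [c]) ∈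
            (["A", "K", "Q", "T", "9", "8", "7", "6", "5", "4", "3", "2"] : List String) := by
          rcases hccases with rfl|rfl|rfl|rfl|rfl|rfl|rfl|rfl|rfl|rfl|rfl|rfl <;> decide
        have hPle := (PySem.List.le_foldl_max_int
          ["A", "K", "Q", "T", "9", "8", "7", "6", "5", "4", "3", "2"]
          (fun card => pv_get_hand_power (PySem.Str.replace hand "J" card))
          (pv_get_hand_power hand)).2 _ hcs_mem
        rw [percard hand c (String.ofList [c]) hcsl hcJ hJ, if_pos hcl] at hPle
        show pv_power_alt ((PySem.List.remove? nv v).getD [] ++ [v + j]) ≤ _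
        rw [hfeq v hv, ← hcv]
        exact hPle

-- ===== VERDICT (by name: the statement is the Claim_ definition above) =====
theorem get_relative_hand_power_spec : Claim_equal_get_relative_hand_power := by
  intro hand _
  unfold Spec_get_relative_hand_power
  exact get_relative_hand_power_spec' hand
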